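-- pv_equiv track=rewrite | github.com/Eric-Xu/streamlit-hmm-nj-tr-pr-20250203 | utils/lender.py | get_lender_to_loan_amounts
-- ===== SOURCE A (Python) =====
-- from typing import Dict, List, Set, Tuple
--
-- def get_lender_to_loan_amounts(prepped_data: List[Dict]) -> Dict[str, List[int]]:
--     """
--     Returns a dictionary mapping each lender to a list of their loan amounts.
--     """
--     lender_to_loan_amounts: Dict[str, List[int]] = {}
--     for item in prepped_data:
--         lender = item.get("lenderName", "")
--         loan_amount = int(item.get("loanAmount", 0))
--         if lender:
--             if lender not in lender_to_loan_amounts: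
--                 lender_to_loan_amounts[lender] = []
--             lender_to_loan_amounts[lender].append(loan_amount)
--
--     return lender_to_loan_amounts
-- ===== SOURCE B (Python) =====
-- def get_lender_to_loan_amounts(prepped_data):
--     """
--     Returns a dictionary mapping each lender to a list of their loan amounts.
--     Two grouped passes: collect distinct lender names in first-seen order,
--     then build each lender's amount list by a per-key comprehension.
--     """
--     lenders = []
--     for item in prepped_data:
--         name = item.get("lenderName", "")
--         if name and name not in lenders:
--             lenders.append(name)
--     return {
--         name: [int(item.get("loanAmount", 0)) for item in prepped_data
--                if item.get("lenderName", "") == name]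
--         for name in lenders
--     }
-- ===== Notes on version B (the rewrite author's own statement) =====
-- stated objective: alternative
-- what changed: Replaces A's single-pass dict-insert-append grouping by two grouped passes: collect the distinct non-empty lender names in first-seen order, then build each lender's amount list with a per-key comprehension in a dict comprehension.
-- crash fix: On inputs where every item with a non-empty lenderName has a parseable loanAmount but some empty/missing-lenderName item does not, A raises ValueError from int() while B never parses those items and returns the grouped dict. — e.g. on get_lender_to_loan_amounts([[("lenderName", "Acme"), ("loanAmount", "5")], [("loanAmount", "oops")]]): A raises ValueError, B returns [("Acme", [5])]
import Mathlib
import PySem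

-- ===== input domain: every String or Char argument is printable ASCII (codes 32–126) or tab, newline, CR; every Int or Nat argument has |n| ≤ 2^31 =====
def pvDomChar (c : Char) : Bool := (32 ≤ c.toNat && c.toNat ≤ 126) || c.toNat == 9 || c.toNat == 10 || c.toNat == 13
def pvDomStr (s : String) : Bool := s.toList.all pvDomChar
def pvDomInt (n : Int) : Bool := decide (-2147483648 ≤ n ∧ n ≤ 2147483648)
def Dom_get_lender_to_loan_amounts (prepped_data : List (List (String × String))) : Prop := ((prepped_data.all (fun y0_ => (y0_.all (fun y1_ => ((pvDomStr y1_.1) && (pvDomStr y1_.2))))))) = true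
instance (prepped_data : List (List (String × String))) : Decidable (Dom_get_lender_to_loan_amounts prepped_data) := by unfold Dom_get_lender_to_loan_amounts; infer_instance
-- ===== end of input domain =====

-- B replaces A's single-pass dict-insert grouping by two grouped passes (distinct lender
-- names first, then one per-key comprehension); same return value, no speed claim.
-- Python B only parses loanAmount of items whose lenderName is non-empty, so it returns
-- where A's int() raises on an empty-lender item (see Raises_ below).

-- shared helpers: item.get("lenderName", "") and int(item.get("loanAmount", 0))
def pvLender (item : List (String × String)) : String :=
  (PySem.Dict.mk item).getD "lenderName" ""

-- int(item.get("loanAmount", 0)): none = ValueError of int() (excluded by Pre_)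
def pvLoan? (item : List (String × String)) : Option Int :=
  match (PySem.Dict.mk item).get? "loanAmount" with
  | none => some 0
  | some s => PySem.Int.ofStr? s

-- total form, used under Pre_ (the parse succeeds there)
def pvLoan (item : List (String × String)) : Int := (pvLoan? item).getD 0

-- ===== PORT A =====
def get_lender_to_loan_amounts (prepped_data : List (List (String × String))) : List (String × List Int) :=
  (prepped_data.foldl (fun d item =>
      let lender := pvLender item
      let loan := pvLoan item
      if lender ≠ "" then
        -- 'if lender not in d: d[lender] = []' then 'd[lender].append(loan)'
        (if d.contains lender = false then d.insert lender ([] : List Int) else d).modify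
          lender [] (fun xs => xs ++ [loan])
      else d)
    PySem.Dict.empty).items

-- ===== PORT B =====
def get_lender_to_loan_amounts_alt (prepped_data : List (List (String × String))) : List (String × List Int) :=
  let lenders := prepped_data.foldl (fun acc item =>
      let name := pvLender item
      if name ≠ "" ∧ name ∉ acc then acc ++ [name] else acc) []
  lenders.map (fun name =>
    (name, (prepped_data.filter (fun item => pvLender item == name)).map (fun item => pvLoan item)))

-- ===== PRECONDITION & SPEC =====
-- Pre_ excludes exactly the inputs where A's int() raises ValueError: some item whose
-- "loanAmount" value does not parse as a Python int.
def Pre_get_lender_to_loan_amounts (prepped_data : List (List (String × String))) : Prop :=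
  ∀ item ∈ prepped_data, (pvLoan? item).isSome = true
instance (prepped_data : List (List (String × String))) : Decidable (Pre_get_lender_to_loan_amounts prepped_data) := by unfold Pre_get_lender_to_loan_amounts; infer_instance

def pvWitness_get_lender_to_loan_amounts : (List (List (String × String))) :=
  [[("lenderName", "Acme"), ("loanAmount", "100")], [("lenderName", "Acme"), ("loanAmount", "7")], [("lenderName", "B"), ("loanAmount", "-3")]]

-- A raises ValueError (int() on an unparseable loanAmount of an item whose lenderName is
-- empty/missing) while B never parses those items and returns the grouped dict.
def Raises_get_lender_to_loan_amounts (prepped_data : List (List (String × String))) : Prop :=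
  (∃ item ∈ prepped_data, (pvLoan? item).isSome = false) ∧
  (∀ item ∈ prepped_data, pvLender item ≠ "" → (pvLoan? item).isSome = true)
instance (prepped_data : List (List (String × String))) : Decidable (Raises_get_lender_to_loan_amounts prepped_data) := by unfold Raises_get_lender_to_loan_amounts; infer_instance

def pvRaiseWitness_get_lender_to_loan_amounts : (List (List (String × String))) :=
  [[("lenderName", "Acme"), ("loanAmount", "5")], [("loanAmount", "oops")]]

def pvRaiseWitnessOut_get_lender_to_loan_amounts : List (String × List Int) := [("Acme", [5])]

def Spec_get_lender_to_loan_amounts (prepped_data : List (List (String × String))) (out : List (String × List Int)) : Prop := out = get_lender_to_loan_amounts_alt prepped_data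
instance (prepped_data : List (List (String × String))) (out : List (String × List Int)) : Decidable (Spec_get_lender_to_loan_amounts prepped_data out) := by unfold Spec_get_lender_to_loan_amounts; infer_instance

-- ===== CLAIM (what is proved, stated in full; the proofs are below) =====
def Claim_equal_get_lender_to_loan_amounts : Prop := ∀ (prepped_data : List (List (String × String))), Dom_get_lender_to_loan_amounts prepped_data → Pre_get_lender_to_loan_amounts prepped_data → Spec_get_lender_to_loan_amounts prepped_data (get_lender_to_loan_amounts prepped_data)

def Claim_raises_get_lender_to_loan_amounts : Prop := (∀ (prepped_data : List (List (String × String))), Dom_get_lender_to_loan_amounts prepped_data → Raises_get_lender_to_loan_amounts prepped_data → ¬ Pre_get_lender_to_loan_amounts prepped_data) ∧ (Dom_get_lender_to_loan_amounts (pvRaiseWitness_get_lender_to_loan_amounts) ∧ Raises_get_lender_to_loan_amounts (pvRaiseWitness_get_lender_to_loan_amounts) ∧ get_lender_to_loan_amounts_alt (pvRaiseWitness_get_lender_to_loan_amounts) = pvRaiseWitnessOut_get_lender_to_loan_amounts)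

-- ===== LEMMAS AND PROOFS =====

-- A's branch pair ('insert [] if absent' then append) is one Dict.modify
theorem pv_step_eq {ν : Type} (d : PySem.Dict String ν) (k : String) (dflt : ν) (f : ν → ν) :
    (if d.contains k = false then d.insert k dflt else d).modify k dflt f = d.modify k dflt f := by
  cases h : d.contains k with
  | true => simp
  | false =>
    have hany : (d.items.any fun p => p.1 == k) = false := h
    have hall : ∀ p ∈ d.items, ¬ p.1 = k := by
      intro p hp; simpa using List.any_eq_false.mp hany p hp
    have hfind : d.items.find? (fun p => p.1 == k) = none :=
      List.find?_eq_none.mpr (fun p hp => by simpa using hall p hp)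
    apply PySem.Dict.ext
    simp only [PySem.Dict.modify, PySem.Dict.insert, PySem.Dict.getD, PySem.Dict.get?,
      PySem.Dict.contains, hany, Bool.false_eq_true, if_false]
    simp [List.find?_append, hfind]
    have : List.map (fun p => if p.1 = k then (k, f dflt) else p) d.items
        = List.map id d.items :=
      List.map_congr_left (fun p hp => by simp [hall p hp])
    simpa using this

-- B's first pass is an ordered-set update of the non-empty lender names
theorem pv_lenders_eq (l : List (List (String × String))) (acc : List String) :
    l.foldl (fun acc item =>
        if pvLender item ≠ "" ∧ pvLender item ∉ acc then acc ++ [pvLender item] else acc) acc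
      = PySem.Set.update acc ((l.filter (fun it => decide (pvLender it ≠ ""))).map pvLender) := by
  induction l generalizing acc with
  | nil => simp [PySem.Set.update]
  | cons it l ih =>
    by_cases hc : pvLender it ≠ ""
    · by_cases hm : pvLender it ∈ acc
      · simp [hc, hm, PySem.Set.update_cons, ih]
      · simp [hc, hm, PySem.Set.update_cons, ih]
    · simp [hc, ih]

theorem get_lender_eq (prepped_data : List (List (String × String))) :
    get_lender_to_loan_amounts prepped_data = get_lender_to_loan_amounts_alt prepped_data := by
  unfold get_lender_to_loan_amounts get_lender_to_loan_amounts_alt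
  have h1 : prepped_data.foldl (fun d item =>
      if pvLender item ≠ "" then
        (if d.contains (pvLender item) = false then d.insert (pvLender item) ([] : List Int) else d).modify
          (pvLender item) [] (fun xs => xs ++ [pvLoan item])
      else d) PySem.Dict.empty
      = prepped_data.foldl (fun d item =>
          if pvLender item ≠ "" then d.modify (pvLender item) [] (fun xs => xs ++ [pvLoan item]) else d)
        PySem.Dict.empty := by
    apply PySem.List.foldl_congr_mem
    intro d item _
    by_cases hc : pvLender item ≠ "" <;> simp [hc, pv_step_eq]
  rw [h1, PySem.List.foldl_ite_eq_foldl_filter]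
  rw [← List.foldl_map (f := fun it => (pvLender it, pvLoan it))
      (g := fun (d : PySem.Dict String (List Int)) (p : String × Int) =>
        d.modify p.1 [] (fun xs => xs ++ [p.2]))]
  rw [pv_lenders_eq]
  set P : List (String × String) → Prop := fun it => pvLender it ≠ "" with hP
  set F : List (String × Int) := ((prepped_data.filter (fun it => decide (P it))).map
      (fun it => (pvLender it, pvLoan it))) with hF
  set D : PySem.Dict String (List Int) := F.foldl
      (fun d p => d.modify p.1 [] (fun xs => xs ++ [p.2])) PySem.Dict.empty with hD
  have hkeys : D.keys = PySem.Set.ofList (F.map (fun p => p.1)) := by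
    rw [hD, PySem.Dict.keys_foldl_modify_key (key := fun p : String × Int => p.1)
      (f := fun _ p => fun xs => xs ++ [p.2])]
    simp [PySem.Set.update_nil_left]
  have hnodup : D.keys.Nodup := by rw [hkeys]; exact PySem.Set.nodup_ofList _
  have hitems : D.items = D.keys.map (fun k => (k, D.getD k [])) :=
    PySem.Dict.items_eq_map_keys D hnodup []
  have hmapfst : F.map (fun p => p.1)
      = (prepped_data.filter (fun it => decide (P it))).map pvLender := by
    simp [hF, Function.comp]
  rw [hitems, hkeys, hmapfst, PySem.Set.update_nil_left]
  apply List.map_congr_left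
  intro k hk
  have hkne : k ≠ "" := by
    have := (PySem.Set.mem_ofList _ _).mp hk
    obtain ⟨it, hit, rfl⟩ := List.mem_map.mp this
    have := (List.mem_filter.mp hit).2
    simpa [hP] using this
  have hgetD : D.getD k [] = (F.filter (fun p => p.1 == k)).map (fun p => p.2) := by
    rw [hD, PySem.Dict.getD_foldl_modify_append]
    simp
  rw [hgetD, hF]
  rw [List.filter_map, List.filter_filter, List.map_map]
  have hq : ∀ it ∈ prepped_data,
      (((fun p : String × Int => p.1 == k) ∘ fun it => (pvLender it, pvLoan it)) it
        && decide (P it)) = (pvLender it == k) := by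
    intro it _
    by_cases hek : pvLender it = k
    · simp [Function.comp, hek, hP, hkne]
    · simp [Function.comp, hek]
  rw [List.filter_congr hq]
  simp [Function.comp]

-- ===== VERDICT (by name: the statement is the Claim_ definition above) =====
theorem get_lender_to_loan_amounts_spec : Claim_equal_get_lender_to_loan_amounts := by
  intro prepped_data _ _
  unfold Spec_get_lender_to_loan_amounts
  exact get_lender_eq prepped_data

def get_lender_to_loan_amounts_raises : Claim_raises_get_lender_to_loan_amounts := by
  unfold Claim_raises_get_lender_to_loan_amounts
  refine ⟨?_, by decide⟩
  intro prepped_data _ hr hpre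
  obtain ⟨⟨item, hmem, hbad⟩, _⟩ := hr
  rw [hpre item hmem] at hbad
  simp at hbad
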